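-- pv_equiv track=rewrite | github.com/Maxic/advent | day10/problems.py | update_stars
-- ===== SOURCE A (Python) =====
-- def update_stars(stars):
--     y_list = []
--     x_list = []
--     # change coordinates by velocity
--     for star in stars:
--         star[0] = (star[0][0] + star[1][0], star[0][1] + star[1][1])
--         y_list.append(star[0][1])
--         x_list.append(star[0][0])
--     max_x = max(x_list)
--     max_y = max(y_list)
--     min_y = min(y_list)
--     min_x = min(x_list)
--     return max_x, max_y, min_x, min_y, stars
-- ===== SOURCE B (Python) =====
-- def update_stars(stars):
--     # Same in-place mutation of star[0] as the original; equivalence is about the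
--     # return value (and the returned, mutated stars list).
--     # Single pass with four running extrema instead of building x/y lists.
--     min_x = None
--     for star in stars:
--         x = star[0][0] + star[1][0]
--         y = star[0][1] + star[1][1]
--         star[0] = (x, y)
--         if min_x is None:
--             min_x = max_x = x
--             min_y = max_y = y
--         else:
--             if x < min_x: min_x = x
--             if x > max_x: max_x = x
--             if y < min_y: min_y = y
--             if y > max_y: max_y = y
--     if min_x is None:
--         raise ValueError("update_stars: empty stars")
--     return max_x, max_y, min_x, min_y, stars
-- ===== Notes on version B (the rewrite author's own statement) =====
-- stated objective: simpler
-- what changed: One pass with four running min/max accumulators initialized on the first star, instead of building x_list/y_list and calling max/min four times afterwards.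
import Mathlib
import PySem

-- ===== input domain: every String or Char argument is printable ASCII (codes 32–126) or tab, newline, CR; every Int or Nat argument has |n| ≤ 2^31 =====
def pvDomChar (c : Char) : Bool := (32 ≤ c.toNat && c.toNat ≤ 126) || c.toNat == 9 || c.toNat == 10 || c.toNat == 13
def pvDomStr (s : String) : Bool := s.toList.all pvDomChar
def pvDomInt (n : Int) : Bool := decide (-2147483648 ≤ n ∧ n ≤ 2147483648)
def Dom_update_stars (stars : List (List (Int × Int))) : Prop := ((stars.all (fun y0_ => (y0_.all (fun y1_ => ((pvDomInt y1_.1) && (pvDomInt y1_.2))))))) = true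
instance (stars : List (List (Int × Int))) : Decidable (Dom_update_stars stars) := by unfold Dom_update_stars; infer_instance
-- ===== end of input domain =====

-- B replaces A's x_list/y_list + four max/min scans by four running extrema kept in the
-- single update loop (objective: simpler, O(1) extra space). Both A and B mutate star[0]
-- in place in Python; the equivalence proved here is about the return value (which
-- includes the mutated stars list).


-- ===== PORT A =====
-- loop body: star[0] = (star[0][0]+star[1][0], star[0][1]+star[1][1]); y_list/x_list append
def aStep (acc : List Int × List Int × List (List (Int × Int))) (star : List (Int × Int)) :
    List Int × List Int × List (List (Int × Int)) :=
  let p := (PySem.List.pyGet? star 0).getD (0, 0)   -- star[0] (Pre_ guarantees in range)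
  let v := (PySem.List.pyGet? star 1).getD (0, 0)   -- star[1]
  let np := (p.1 + v.1, p.2 + v.2)
  (acc.1 ++ [np.2], acc.2.1 ++ [np.1], acc.2.2 ++ [np :: star.drop 1])  -- star[0] = np

def update_stars (stars : List (List (Int × Int))) : Int × Int × Int × Int × (List (List (Int × Int))) :=
  let r := stars.foldl aStep ([], [], [])
  let max_x := (PySem.List.max? r.2.1 (fun x => x)).getD 0   -- max([]) raises: outside Pre_
  let max_y := (PySem.List.max? r.1 (fun x => x)).getD 0
  let min_y := (PySem.List.min? r.1 (fun x => x)).getD 0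
  let min_x := (PySem.List.min? r.2.1 (fun x => x)).getD 0
  (max_x, max_y, min_x, min_y, r.2.2)

-- ===== PORT B =====
-- loop body: move the star, then update (min_x, max_x, min_y, max_y), None-initialized
def bStep (acc : Option (Int × Int × Int × Int) × List (List (Int × Int))) (star : List (Int × Int)) :
    Option (Int × Int × Int × Int) × List (List (Int × Int)) :=
  let p := (PySem.List.pyGet? star 0).getD (0, 0)
  let v := (PySem.List.pyGet? star 1).getD (0, 0)
  let x := p.1 + v.1
  let y := p.2 + v.2
  let box :=
    match acc.1 with
    | none => (x, x, y, y)
    | some (mnx, mxx, mny, mxy) =>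
        (if x < mnx then x else mnx, if x > mxx then x else mxx,
         if y < mny then y else mny, if y > mxy then y else mxy)
  (some box, acc.2 ++ [(x, y) :: star.drop 1])

def update_stars_alt (stars : List (List (Int × Int))) : Int × Int × Int × Int × (List (List (Int × Int))) :=
  let r := stars.foldl bStep (none, [])
  match r.1 with
  | none => (0, 0, 0, 0, r.2)   -- Python B raises ValueError here: outside Pre_
  | some (mnx, mxx, mny, mxy) => (mxx, mxy, mnx, mny, r.2)

-- ===== PRECONDITION & SPEC =====
-- Pre_ excludes the inputs on which A raises: empty stars (max([]) → ValueError) and any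
-- star with fewer than 2 entries (star[0]/star[1] → IndexError).
def Pre_update_stars (stars : List (List (Int × Int))) : Prop :=
  stars ≠ [] ∧ ∀ s ∈ stars, 2 ≤ s.length
instance (stars : List (List (Int × Int))) : Decidable (Pre_update_stars stars) := by
  unfold Pre_update_stars; infer_instance
def pvWitness_update_stars : (List (List (Int × Int))) := [[(1, 2), (3, -1)], [(0, 0), (1, 1)]]

def Spec_update_stars (stars : List (List (Int × Int))) (out : Int × Int × Int × Int × (List (List (Int × Int)))) : Prop := out = update_stars_alt stars
instance (stars : List (List (Int × Int))) (out : Int × Int × Int × Int × (List (List (Int × Int)))) : Decidable (Spec_update_stars stars out) := by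
  unfold Spec_update_stars
  letI h1 : DecidableEq (Int × List (List (Int × Int))) := instDecidableEqProd
  letI h2 : DecidableEq (Int × Int × List (List (Int × Int))) := instDecidableEqProd
  letI h3 : DecidableEq (Int × Int × Int × List (List (Int × Int))) := instDecidableEqProd
  exact instDecidableEqProd out (update_stars_alt stars)

-- ===== CLAIM (what is proved, stated in full; the proofs are below) =====
def Claim_equal_update_stars : Prop := ∀ (stars : List (List (Int × Int))), Dom_update_stars stars → Pre_update_stars stars → Spec_update_stars stars (update_stars stars)

-- ===== LEMMAS AND PROOFS =====
-- the moved star and its new coordinates (proof-side abbreviations)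
def pvMv (star : List (Int × Int)) : List (Int × Int) :=
  let p := (PySem.List.pyGet? star 0).getD (0, 0)
  let v := (PySem.List.pyGet? star 1).getD (0, 0)
  (p.1 + v.1, p.2 + v.2) :: star.drop 1
def pvFx (star : List (Int × Int)) : Int :=
  ((PySem.List.pyGet? star 0).getD (0, 0)).1 + ((PySem.List.pyGet? star 1).getD (0, 0)).1
def pvFy (star : List (Int × Int)) : Int :=
  ((PySem.List.pyGet? star 0).getD (0, 0)).2 + ((PySem.List.pyGet? star 1).getD (0, 0)).2

theorem afold (t : List (List (Int × Int))) (yl xl : List Int) (ns : List (List (Int × Int))) :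
    t.foldl aStep (yl, xl, ns) = (yl ++ t.map pvFy, xl ++ t.map pvFx, ns ++ t.map pvMv) := by
  induction t generalizing yl xl ns with
  | nil => simp
  | cons s t ih => simp [aStep, ih, pvFx, pvFy, pvMv]

theorem bfold (t : List (List (Int × Int))) (a b c d : Int) (ns : List (List (Int × Int))) :
    t.foldl bStep (some (a, b, c, d), ns) =
      (some ((t.map pvFx).foldl min a, (t.map pvFx).foldl max b,
             (t.map pvFy).foldl min c, (t.map pvFy).foldl max d), ns ++ t.map pvMv) := by
  induction t generalizing a b c d ns with
  | nil => simp
  | cons s t ih =>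
      have hmin : ∀ (a x : Int), (if x < a then x else a) = min a x := by
        intro a x; rw [min_def]; split_ifs <;> omega
      have hmax : ∀ (a x : Int), (if x > a then x else a) = max a x := by
        intro a x; rw [max_def]; split_ifs <;> omega
      simp only [List.foldl_cons, List.map_cons, bStep, hmin, hmax, ih, pvFx, pvFy, pvMv]
      simp

-- ===== VERDICT (by name: the statement is the Claim_ definition above) =====
theorem update_stars_spec : Claim_equal_update_stars := by
  intro stars _ hpre
  obtain ⟨hne, -⟩ := hpre
  obtain ⟨s, t, rfl⟩ := List.exists_cons_of_ne_nil hne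
  unfold Spec_update_stars update_stars update_stars_alt
  rw [List.foldl_cons, List.foldl_cons]
  show let r := t.foldl aStep (aStep ([], [], []) s); _
  rw [afold]
  have hb : bStep (none, ([] : List (List (Int × Int)))) s =
      (some (pvFx s, pvFx s, pvFy s, pvFy s), [pvMv s]) := by
    simp [bStep, pvFx, pvFy, pvMv]
  rw [hb, bfold]
  simp [aStep, PySem.List.max?_id_cons, PySem.List.min?_id_cons, pvFx, pvFy, pvMv]
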